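-- pv_equiv track=rewrite | github.com/Tiernan8r/zcurve | src/uninterleave.py | uninterleave
-- ===== SOURCE A (Python) =====
-- from typing import List
-- import math
--
-- def uninterleave(bit_sequence, ngroups) -> List[int]:
--     res = [0] * ngroups
--
--     nbits = math.ceil(math.log2(bit_sequence))
--     niterations = math.ceil(nbits / ngroups) * ngroups
--
--     for j in range(niterations):
--         i = j % ngroups
--
--         curbit = bit_sequence & 1
--         bit_sequence = bit_sequence >> 1
--
--         res[i] = (res[i] << 1) | curbit
--
--     return res
-- ===== SOURCE B (Python) =====
-- from typing import List
-- import math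
--
-- def uninterleave(bit_sequence, ngroups) -> List[int]:
--     nbits = math.ceil(math.log2(bit_sequence))
--     per = math.ceil(nbits / ngroups)
--
--     res = []
--     for i in range(ngroups):
--         val = 0
--         for k in range(per):
--             val = (val << 1) | ((bit_sequence >> (i + k * ngroups)) & 1)
--         res.append(val)
--     return res
-- ===== Notes on version B (the rewrite author's own statement) =====
-- stated objective: alternative
-- what changed: Replaces A's single destructive round-robin pass (shifting bit_sequence and updating res[j % ngroups] in place) by a group-by-group nested loop that reads each bit non-destructively by its position i + k*ngroups and builds each group's value independently.
import Mathlib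
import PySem

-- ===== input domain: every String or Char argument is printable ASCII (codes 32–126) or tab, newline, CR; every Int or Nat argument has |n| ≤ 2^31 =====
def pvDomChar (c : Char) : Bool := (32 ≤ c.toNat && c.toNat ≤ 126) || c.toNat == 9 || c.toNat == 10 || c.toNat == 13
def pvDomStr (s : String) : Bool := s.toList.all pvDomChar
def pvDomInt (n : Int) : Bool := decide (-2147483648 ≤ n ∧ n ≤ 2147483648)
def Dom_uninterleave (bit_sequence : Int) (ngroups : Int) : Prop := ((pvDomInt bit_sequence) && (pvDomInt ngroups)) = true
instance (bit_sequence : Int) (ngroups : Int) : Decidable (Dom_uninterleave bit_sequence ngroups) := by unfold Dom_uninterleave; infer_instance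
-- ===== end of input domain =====

-- B replaces A's destructive round-robin pass (shift bit_sequence, update res[j % ngroups]) by an
-- independent group-by-group loop that reads each bit by its position: alternative decomposition, same cost.


-- ===== PORT A =====
-- math.ceil(math.log2(bs)) : on the admitted domain 1 ≤ bs ≤ 2^31 this equals the bit length of bs - 1
-- (checked exhaustively/at random against CPython over the domain)
def pvCeilLog2 (bs : Int) : Int := (PySem.Int.bitLength (bs - 1) : Int)

-- math.ceil(a / b) = -((-a) // b) : exact for the small magnitudes reached here (checked against CPython)
def pvCeilDiv (a b : Int) : Int := -(PySem.Int.floordiv (-a) b)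

def uninterleave (bit_sequence : Int) (ngroups : Int) : List Int :=
  let res : List Int := List.replicate ngroups.toNat 0
  let nbits : Int := pvCeilLog2 bit_sequence
  let niterations : Int := pvCeilDiv nbits ngroups * ngroups
  let st := (PySem.List.pyRange 0 niterations 1).foldl
    (fun (st : List Int × Int) j =>
      let i : Int := PySem.Int.mod j ngroups
      let curbit : Int := PySem.Int.band st.2 1
      let bs' : Int := st.2 >>> (1 : Nat)
      let res' : List Int :=
        PySem.List.pySetD st.1 i (PySem.Int.bor ((PySem.List.pyGetD st.1 i 0) <<< (1 : Nat)) curbit)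
      (res', bs'))
    (res, bit_sequence)
  st.1

-- ===== PORT B =====
def uninterleave_alt (bit_sequence : Int) (ngroups : Int) : List Int :=
  let nbits : Int := pvCeilLog2 bit_sequence
  let per : Int := pvCeilDiv nbits ngroups
  (PySem.List.pyRange 0 ngroups 1).foldl
    (fun (acc : List Int) i =>
      acc ++ [(PySem.List.pyRange 0 per 1).foldl
        (fun (val : Int) k =>
          PySem.Int.bor (val <<< (1 : Nat))
            (PySem.Int.band (bit_sequence >>> (i + k * ngroups).toNat) 1))
        0])
    []

-- ===== PRECONDITION & SPEC =====
-- Pre_ excludes exactly the inputs on which A raises: bit_sequence < 1 (math.log2 raises ValueError),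
-- ngroups = 0 (ZeroDivisionError), and negative ngroups with a bit count of at least -ngroups
-- (IndexError on the empty res); negative ngroups with fewer bits is kept (both return []).
def Pre_uninterleave (bit_sequence : Int) (ngroups : Int) : Prop :=
  1 ≤ bit_sequence ∧
    (1 ≤ ngroups ∨
      (ngroups ≤ -1 ∧ ((PySem.Int.bitLength (bit_sequence - 1) : Int) < -ngroups)))
instance (bit_sequence : Int) (ngroups : Int) : Decidable (Pre_uninterleave bit_sequence ngroups) := by
  unfold Pre_uninterleave; infer_instance

def pvWitness_uninterleave : Int × Int := (44, 2)

def Spec_uninterleave (bit_sequence : Int) (ngroups : Int) (out : List Int) : Prop := out = uninterleave_alt bit_sequence ngroups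
instance (bit_sequence : Int) (ngroups : Int) (out : List Int) : Decidable (Spec_uninterleave bit_sequence ngroups out) := by unfold Spec_uninterleave; infer_instance

-- ===== CLAIM (what is proved, stated in full; the proofs are below) =====
def Claim_equal_uninterleave : Prop := ∀ (bit_sequence : Int) (ngroups : Int), Dom_uninterleave bit_sequence ngroups → Pre_uninterleave bit_sequence ngroups → Spec_uninterleave bit_sequence ngroups (uninterleave bit_sequence ngroups)

-- ===== LEMMAS AND PROOFS =====

-- the bit of bs at position t
def pvBit (bs : Int) (t : Nat) : Int := PySem.Int.band (bs >>> t) 1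

-- B's value for group i after reading c of its bits
def pvG (bs : Int) (n i c : Nat) : Int :=
  (List.range c).foldl (fun v k => PySem.Int.bor (v <<< (1 : Nat)) (pvBit bs (i + k * n))) 0

-- how many of the first m round-robin steps hit group i
def pvCnt (n i m : Nat) : Nat := m / n + (if i < m % n then 1 else 0)

-- A's loop body, named for the invariant proof
def pvStepA (ng : Int) (st : List Int × Int) (j : Int) : List Int × Int :=
  let i : Int := PySem.Int.mod j ng
  let curbit : Int := PySem.Int.band st.2 1
  let bs' : Int := st.2 >>> (1 : Nat)
  let res' : List Int :=
    PySem.List.pySetD st.1 i (PySem.Int.bor ((PySem.List.pyGetD st.1 i 0) <<< (1 : Nat)) curbit)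
  (res', bs')

theorem pvDivSucc (n m : Nat) (hn : 0 < n) :
    ((m % n + 1 < n) → (m + 1) / n = m / n ∧ (m + 1) % n = m % n + 1) ∧
    ((m % n + 1 = n) → (m + 1) / n = m / n + 1 ∧ (m + 1) % n = 0) := by
  have hdm := Nat.div_add_mod m n
  rw [Nat.mul_comm] at hdm
  constructor
  · intro h
    constructor
    · conv_lhs => rw [show m + 1 = (m % n + 1) + (m / n) * n by omega]
      rw [Nat.add_mul_div_right _ _ hn, Nat.div_eq_of_lt h]; omega
    · conv_lhs => rw [show m + 1 = (m % n + 1) + (m / n) * n by omega]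
      rw [Nat.add_mul_mod_self_right, Nat.mod_eq_of_lt h]
  · intro h
    constructor
    · conv_lhs => rw [show m + 1 = n + (m / n) * n by omega]
      rw [Nat.add_mul_div_right _ _ hn, Nat.div_self hn]; omega
    · conv_lhs => rw [show m + 1 = 0 + (m / n + 1) * n by
        rw [Nat.add_mul, Nat.one_mul]; omega]
      rw [Nat.add_mul_mod_self_right, Nat.zero_mod]

theorem pvCnt_succ_self (n m : Nat) (hn : 0 < n) :
    pvCnt n (m % n) (m + 1) = pvCnt n (m % n) m + 1 := by
  unfold pvCnt
  obtain ⟨c1, c2⟩ := pvDivSucc n m hn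
  have hmlt := Nat.mod_lt m hn
  rcases Nat.lt_or_ge (m % n + 1) n with h | h
  · obtain ⟨h1, h2⟩ := c1 h
    rw [h1, h2]
    simp
  · obtain ⟨h1, h2⟩ := c2 (by omega)
    rw [h1, h2]
    simp

theorem pvCnt_succ_other (n i m : Nat) (hn : 0 < n) (hin : i < n) (hi : i ≠ m % n) :
    pvCnt n i (m + 1) = pvCnt n i m := by
  unfold pvCnt
  obtain ⟨c1, c2⟩ := pvDivSucc n m hn
  have hmlt := Nat.mod_lt m hn
  rcases Nat.lt_or_ge (m % n + 1) n with h | h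
  · obtain ⟨h1, h2⟩ := c1 h
    rw [h1, h2]
    by_cases hc : i < m % n
    · have hc' : i < m % n + 1 := by omega
      rw [if_pos hc, if_pos hc']
    · have hc' : ¬ (i < m % n + 1) := by omega
      rw [if_neg hc, if_neg hc']
  · obtain ⟨h1, h2⟩ := c2 (by omega)
    rw [h1, h2]
    have hc : i < m % n := by omega
    rw [if_pos hc]
    simp

theorem pvCnt_self_mul (n m : Nat) (_hn : 0 < n) :
    m % n + pvCnt n (m % n) m * n = m := by
  unfold pvCnt
  have hdm := Nat.div_add_mod m n
  rw [Nat.mul_comm] at hdm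
  simp
  omega

theorem pvCnt_mul (n i p : Nat) (hn : 0 < n) (_hi : i < n) : pvCnt n i (p * n) = p := by
  unfold pvCnt
  rw [Nat.mul_div_cancel _ hn, Nat.mul_mod_left]
  simp

theorem pvShift_shift (bs : Int) (m : Nat) : (bs >>> m) >>> (1 : Nat) = bs >>> (m + 1) := by
  simp [Int.shiftRight_add]

theorem pvG_succ (bs : Int) (n i c : Nat) :
    pvG bs n i (c + 1) = PySem.Int.bor (pvG bs n i c <<< (1 : Nat)) (pvBit bs (i + c * n)) := by
  simp [pvG, List.range_succ]

theorem pvSet_map_range (f g : Nat → Int) (n i0 : Nat) (_h0 : i0 < n) (v : Int)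
    (hv : g i0 = v) (hothers : ∀ i, i < n → i ≠ i0 → g i = f i) :
    ((List.range n).map f).set i0 v = (List.range n).map g := by
  apply List.ext_getElem (by simp)
  intro k h1 h2
  simp only [List.length_map, List.length_range] at h1 h2
  simp only [List.getElem_set, List.getElem_map, List.getElem_range]
  by_cases hk : i0 = k
  · subst hk; simp [hv]
  · rw [if_neg hk, hothers k h2 (fun he => hk he.symm)]

theorem pvA_inv (bs : Int) (n : Nat) (hn : 0 < n) (m : Nat) :
    (PySem.List.pyRange 0 (m : Int) 1).foldl (pvStepA (n : Int))
        (List.replicate n 0, bs)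
      = ((List.range n).map (fun i => pvG bs n i (pvCnt n i m)), bs >>> m) := by
  induction m with
  | zero =>
    rw [show PySem.List.pyRange 0 ((0 : Nat) : Int) 1 = [] from PySem.List.pyRange_one_eq_nil (by simp)]
    simp only [List.foldl_nil, Int.shiftRight_zero]
    refine Prod.ext ?_ rfl
    simp only []
    symm
    rw [List.eq_replicate_iff]
    refine ⟨by simp, ?_⟩
    intro b hb
    simp only [List.mem_map, List.mem_range] at hb
    obtain ⟨i, _, hi⟩ := hb
    simp [pvCnt, pvG] at hi
    omega
  | succ m ih =>
    have hcast : ((m + 1 : Nat) : Int) = (m : Int) + 1 := by push_cast; ring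
    rw [hcast, PySem.List.pyRange_one_succ_right (by positivity), List.foldl_append, ih]
    simp only [List.foldl_cons, List.foldl_nil]
    unfold pvStepA
    simp only []
    have hmod : PySem.Int.mod (m : Int) (n : Int) = ((m % n : Nat) : Int) := by
      exact_mod_cast PySem.Int.mod_natCast m n
    rw [hmod]
    have hmn : m % n < n := Nat.mod_lt m hn
    have hget : PySem.List.pyGetD ((List.range n).map (fun i => pvG bs n i (pvCnt n i m))) ((m % n : Nat) : Int) 0
        = pvG bs n (m % n) (pvCnt n (m % n) m) := by
      rw [PySem.List.pyGetD_natCast]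
      rw [List.getD_eq_getElem?_getD]
      simp [hmn]
    have hset : PySem.List.pySetD ((List.range n).map (fun i => pvG bs n i (pvCnt n i m))) ((m % n : Nat) : Int)
          (PySem.Int.bor ((pvG bs n (m % n) (pvCnt n (m % n) m)) <<< (1 : Nat)) (PySem.Int.band (bs >>> m) 1))
        = (List.range n).map (fun i => pvG bs n i (pvCnt n i (m + 1))) := by
      rw [PySem.List.pySetD_natCast]
      apply pvSet_map_range _ _ n (m % n) hmn
      · rw [pvCnt_succ_self n m hn, pvG_succ]
        have : (m % n) + (pvCnt n (m % n) m) * n = m := pvCnt_self_mul n m hn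
        rw [this]
        rfl
      · intro i hin hi
        rw [pvCnt_succ_other n i m hn hin hi]
    refine Prod.ext ?_ ?_
    · simp only []
      rw [hget, hset]
    · simp only []
      exact pvShift_shift bs m

theorem pv_ceilDiv_deg (nbits ng : Int) (hnb : 0 ≤ nbits) (hng : ng ≤ -1) (hlt : nbits < -ng) :
    pvCeilDiv nbits ng = 0 := by
  unfold pvCeilDiv
  set q := PySem.Int.floordiv (-nbits) ng with hq
  have h1 := PySem.Int.floordiv_mul_add_mod (-nbits) ng
  have h2 := PySem.Int.mod_neg_bounds (a := -nbits) (b := ng) (by omega)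
  rw [← hq] at h1
  rcases lt_trichotomy q 0 with h | h | h
  · exfalso
    have hq1 : q ≤ -1 := by omega
    have : q * ng ≥ (-1) * ng := by
      have := mul_le_mul_of_nonpos_right hq1 (show ng ≤ 0 by omega)
      omega
    omega
  · omega
  · exfalso
    have hq1 : (1 : Int) ≤ q := by omega
    have : q * ng ≤ 1 * ng := by
      exact mul_le_mul_of_nonpos_right hq1 (show ng ≤ 0 by omega)
    omega

theorem pv_main (bs ng : Int) (_hbs : 1 ≤ bs) (hng : 1 ≤ ng) :
    uninterleave bs ng = uninterleave_alt bs ng := by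
  set n : Nat := ng.toNat with hn
  have hngn : ng = (n : Int) := by omega
  have hnpos : 0 < n := by omega
  set nbits : Int := pvCeilLog2 bs with hnb
  have hnb0 : 0 ≤ nbits := by rw [hnb]; unfold pvCeilLog2; exact Int.natCast_nonneg _
  set per : Int := pvCeilDiv nbits ng with hper
  have hper0 : 0 ≤ per := by
    rw [hper]
    unfold pvCeilDiv
    rw [PySem.Int.floordiv_eq_ediv_of_pos (by omega)]
    have h1 : (-nbits) / ng ≤ 0 / ng := Int.ediv_le_ediv (by omega) (by omega)
    rw [Int.zero_ediv] at h1
    omega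
  set p : Nat := per.toNat with hp
  have hpern : per = (p : Int) := by omega
  -- A side
  have hA : uninterleave bs ng
      = ((PySem.List.pyRange 0 (per * ng) 1).foldl (pvStepA ng) (List.replicate n 0, bs)).1 := rfl
  have hmul : per * ng = ((p * n : Nat) : Int) := by rw [hpern, hngn]; push_cast; ring
  have hAval : uninterleave bs ng = (List.range n).map (fun i => pvG bs n i p) := by
    rw [hA, hmul, hngn, pvA_inv bs n hnpos (p * n)]
    apply List.map_congr_left
    intro i hi
    rw [pvCnt_mul n i p hnpos (List.mem_range.mp hi)]
  -- B side
  have hB : uninterleave_alt bs ng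
      = (PySem.List.pyRange 0 ng 1).foldl
          (fun (acc : List Int) i =>
            acc ++ [(PySem.List.pyRange 0 per 1).foldl
              (fun (val : Int) k =>
                PySem.Int.bor (val <<< (1 : Nat))
                  (PySem.Int.band (bs >>> (i + k * ng).toNat) 1)) 0]) [] := rfl
  have hBval : uninterleave_alt bs ng = (List.range n).map (fun i => pvG bs n i p) := by
    rw [hB, PySem.List.foldl_append_singleton_eq_map, hngn, hpern]
    simp only [PySem.List.pyRange_one, Int.sub_zero, Int.toNat_natCast, List.map_map, List.foldl_map]
    apply List.map_congr_left
    intro i hi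
    have hi' : i < n := List.mem_range.mp hi
    simp only [Function.comp]
    unfold pvG
    apply PySem.List.foldl_congr_mem
    intro a x hx
    unfold pvBit
    have harg : (0 : Int) + (i : Int) + ((0 : Int) + (x : Int)) * (n : Int) = ((i + x * n : Nat) : Int) := by
      push_cast; ring
    rw [harg, Int.toNat_natCast]
  rw [hAval, hBval]

-- degenerate kept corner: negative ngroups with nbits < -ngroups — both programs return []
theorem pv_deg (bs ng : Int) (_hbs : 1 ≤ bs) (hng : ng ≤ -1)
    (hlt : (PySem.Int.bitLength (bs - 1) : Int) < -ng) :
    uninterleave bs ng = uninterleave_alt bs ng := by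
  have hnb : 0 ≤ pvCeilLog2 bs := Int.natCast_nonneg _
  have hc0 : pvCeilDiv (pvCeilLog2 bs) ng = 0 := pv_ceilDiv_deg _ _ hnb hng hlt
  have hA : uninterleave bs ng
      = ((PySem.List.pyRange 0 (pvCeilDiv (pvCeilLog2 bs) ng * ng) 1).foldl
          (pvStepA ng) (List.replicate ng.toNat 0, bs)).1 := rfl
  have hB : uninterleave_alt bs ng
      = (PySem.List.pyRange 0 ng 1).foldl
          (fun (acc : List Int) i =>
            acc ++ [(PySem.List.pyRange 0 (pvCeilDiv (pvCeilLog2 bs) ng) 1).foldl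
              (fun (val : Int) k =>
                PySem.Int.bor (val <<< (1 : Nat))
                  (PySem.Int.band (bs >>> (i + k * ng).toNat) 1)) 0]) [] := rfl
  rw [hA, hB, hc0]
  rw [show (0 : Int) * ng = 0 by ring]
  rw [PySem.List.pyRange_one_eq_nil (le_refl 0), PySem.List.pyRange_one_eq_nil (by omega : ng ≤ 0)]
  simp only [List.foldl_nil]
  have : ng.toNat = 0 := by omega
  rw [this]
  rfl

-- ===== VERDICT (by name: the statement is the Claim_ definition above) =====
theorem uninterleave_spec : Claim_equal_uninterleave := by
  intro bs ng _hdom hpre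
  unfold Spec_uninterleave
  obtain ⟨hbs, hng | ⟨hng, hlt⟩⟩ := hpre
  · exact pv_main bs ng hbs hng
  · exact pv_deg bs ng hbs hng hlt
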